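-- pv_equiv track=rewrite | github.com/JuanGonzalezCaminero/Seam_Carving | ImageUtility.py | removeMinimalSeamAlt
-- ===== SOURCE A (Python) =====
-- def removeMinimalSeamAlt(energyImage, imageRGB, seamCost):
--
--     minElement = min(seamCost[len(energyImage) - 1])
--     indexOfMin = seamCost[len(energyImage) - 1].index(minElement)
--     previousIndex = indexOfMin
--
--     #Reverse search, removing elements after we find the next
--     for i in range(len(energyImage) - 1, -1, -1):
--         #The search for the index is restricted to the 3 elements from which the minimum
--         #element was extracted since there could be another element of the same value in
--         #other position of the scanline and we dont want that to be returned. Maybe 2 or even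
--         #the 3 of them have the same value, thats irrelevant as then all the routes would yield
--         #a result of the same value
--         if indexOfMin == 0:
--             minElement = min(seamCost[i - 1][indexOfMin],
--                              seamCost[i - 1][indexOfMin + 1])
--             energyImage[i].pop(indexOfMin)
--             imageRGB[i].pop(indexOfMin)
--             previousIndex = indexOfMin
--             indexOfMin = seamCost[i - 1].index(minElement, previousIndex, previousIndex + 2)
--
--         elif indexOfMin == len(seamCost[0]) - 1:
--             minElement = min(seamCost[i - 1][indexOfMin - 1],
--                              seamCost[i - 1][indexOfMin])
--             energyImage[i].pop(indexOfMin)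
--             imageRGB[i].pop(indexOfMin)
--             previousIndex = indexOfMin
--             indexOfMin = seamCost[i - 1].index(minElement, previousIndex - 1, previousIndex + 1)
--
--         else:
--             minElement = min(seamCost[i - 1][indexOfMin - 1],
--                              seamCost[i - 1][indexOfMin],
--                              seamCost[i - 1][indexOfMin + 1])
--             energyImage[i].pop(indexOfMin)
--             imageRGB[i].pop(indexOfMin)
--             previousIndex = indexOfMin
--             indexOfMin = seamCost[i - 1].index(minElement, previousIndex - 1, previousIndex + 2)
--
--     return energyImage, imageRGB
-- ===== SOURCE B (Python) =====
-- def removeMinimalSeamAlt(energyImage, imageRGB, seamCost):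
--     # Two-pass: first record the seam column per row (no mutation), then
--     # rebuild every row without its seam column. Return value matches A;
--     # unlike A, rows are replaced rather than popped in place.
--     h = len(energyImage)
--     w = len(seamCost[0])
--     lastRow = seamCost[h - 1]
--     c = 0
--     for j in range(1, len(lastRow)):
--         if lastRow[j] < lastRow[c]:
--             c = j
--     cols = [0] * h
--     for i in range(h - 1, -1, -1):
--         cols[i] = c
--         row = seamCost[i - 1]
--         lo = max(0, c - 1)
--         hi = min(w, c + 2)
--         best = lo
--         for j in range(lo + 1, hi):
--             if row[j] < row[best]:
--                 best = j
--         c = best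
--     energyOut = [row[:col] + row[col + 1:] for row, col in zip(energyImage, cols)]
--     rgbOut = [row[:col] + row[col + 1:] for row, col in zip(imageRGB, cols)]
--     return energyOut, rgbOut
-- ===== Notes on version B (the rewrite author's own statement) =====
-- stated objective: alternative
-- what changed: B separates concerns into two passes: it first records the seam column per row with a plain leftmost-argmin scan over each 2/3-neighbour window (instead of A's interleaved per-row mutation with min() plus a bounded .index() re-search), then rebuilds every row without its recorded column via slicing, returning fresh row lists instead of popping in place.
import Mathlib
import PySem

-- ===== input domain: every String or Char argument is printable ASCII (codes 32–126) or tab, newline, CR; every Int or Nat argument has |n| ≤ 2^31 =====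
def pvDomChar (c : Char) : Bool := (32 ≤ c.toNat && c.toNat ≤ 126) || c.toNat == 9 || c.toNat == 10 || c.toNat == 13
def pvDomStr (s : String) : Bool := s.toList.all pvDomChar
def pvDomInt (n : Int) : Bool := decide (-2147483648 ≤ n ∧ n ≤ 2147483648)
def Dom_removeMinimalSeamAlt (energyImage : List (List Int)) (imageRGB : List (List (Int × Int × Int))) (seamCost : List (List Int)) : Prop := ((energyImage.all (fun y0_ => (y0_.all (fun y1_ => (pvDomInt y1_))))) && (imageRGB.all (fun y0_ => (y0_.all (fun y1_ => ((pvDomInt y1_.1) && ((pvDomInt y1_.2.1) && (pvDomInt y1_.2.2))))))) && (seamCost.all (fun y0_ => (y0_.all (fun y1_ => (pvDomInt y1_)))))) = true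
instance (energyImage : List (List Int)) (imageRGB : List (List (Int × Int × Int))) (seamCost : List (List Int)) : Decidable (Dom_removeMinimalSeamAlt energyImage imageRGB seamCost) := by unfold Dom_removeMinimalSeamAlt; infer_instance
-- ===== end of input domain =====

-- B records the whole seam first with a plain leftmost-argmin window scan and only then rebuilds the rows by
-- slicing (A interleaves per-row pops with min()+bounded .index() re-searches).  Equivalence is about the RETURN
-- value: Python A mutates energyImage/imageRGB in place, B builds fresh row lists.

-- ===== PORT A =====
-- Python's xs.index(v, lo, hi): first position of v in xs[lo:hi] plus the offset lo.
-- Exact for 0 ≤ lo (the only way A calls it); ValueError = the `none` that .getD 0 covers, excluded by Pre_.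
def pyIndexFrom (xs : List Int) (v : Int) (lo hi : Int) : Int :=
  ((PySem.List.index? (PySem.List.slice xs (some lo) (some hi)) v).map (fun j => lo + (j : Int))).getD 0

-- the 'for i in range(len(energyImage)-1, -1, -1)' loop of A; counter k+1 means i = k
def aLoop (S : List (List Int)) (w : Int) :
    Nat → List (List Int) → List (List (Int × Int × Int)) → Int → Int →
    List (List Int) × List (List (Int × Int × Int))
  | 0, E, R, _, _ => (E, R)
  | k+1, E, R, idx, _prev =>
    let i : Int := (k : Int)
    let row := PySem.List.pyGetD S (i - 1) []
    if idx = 0 then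
      let m := min (PySem.List.pyGetD row idx 0) (PySem.List.pyGetD row (idx + 1) 0)
      let E' := E.set k (((PySem.List.pop? (PySem.List.pyGetD E i []) idx).map Prod.snd).getD [])
      let R' := R.set k (((PySem.List.pop? (PySem.List.pyGetD R i []) idx).map Prod.snd).getD [])
      let prev := idx
      aLoop S w k E' R' (pyIndexFrom row m prev (prev + 2)) prev
    else if idx = w - 1 then
      let m := min (PySem.List.pyGetD row (idx - 1) 0) (PySem.List.pyGetD row idx 0)
      let E' := E.set k (((PySem.List.pop? (PySem.List.pyGetD E i []) idx).map Prod.snd).getD [])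
      let R' := R.set k (((PySem.List.pop? (PySem.List.pyGetD R i []) idx).map Prod.snd).getD [])
      let prev := idx
      aLoop S w k E' R' (pyIndexFrom row m (prev - 1) (prev + 1)) prev
    else
      let m := min (min (PySem.List.pyGetD row (idx - 1) 0) (PySem.List.pyGetD row idx 0))
                   (PySem.List.pyGetD row (idx + 1) 0)
      let E' := E.set k (((PySem.List.pop? (PySem.List.pyGetD E i []) idx).map Prod.snd).getD [])
      let R' := R.set k (((PySem.List.pop? (PySem.List.pyGetD R i []) idx).map Prod.snd).getD [])
      let prev := idx
      aLoop S w k E' R' (pyIndexFrom row m (prev - 1) (prev + 2)) prev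

def removeMinimalSeamAlt (energyImage : List (List Int)) (imageRGB : List (List (Int × Int × Int))) (seamCost : List (List Int)) : List (List Int) × (List (List (Int × Int × Int))) :=
  let lastRow := PySem.List.pyGetD seamCost ((energyImage.length : Int) - 1) []
  let minElement := (PySem.List.min? lastRow (fun x => x)).getD 0
  let indexOfMin : Int := ((PySem.List.index? lastRow minElement).map (fun j => (j : Int))).getD 0
  aLoop seamCost ((PySem.List.pyGetD seamCost 0 []).length : Int)
    energyImage.length energyImage imageRGB indexOfMin indexOfMin

-- ===== PORT B =====
-- Source B's 'best = start; for j in range(start+1, hi): if row[j] < row[best]: best = j'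
def bScan (row : List Int) (start hi : Int) : Int :=
  (PySem.List.pyRange (start + 1) hi 1).foldl
    (fun best j => if PySem.List.pyGetD row j 0 < PySem.List.pyGetD row best 0 then j else best) start

-- Source B's first pass 'for i in range(h-1, -1, -1): cols[i] = c; ...'; counter k+1 means i = k
def bCols (S : List (List Int)) (w : Int) : Nat → Int → List Int
  | 0, _ => []
  | k+1, c =>
    let row := PySem.List.pyGetD S ((k : Int) - 1) []
    bCols S w k (bScan row (max 0 (c - 1)) (min w (c + 2))) ++ [c]

-- Source B's 'row[:c] + row[c+1:]'
def bRemoveAt {α : Type} (row : List α) (c : Int) : List α :=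
  PySem.List.slice row none (some c) ++ PySem.List.slice row (some (c + 1)) none

def removeMinimalSeamAlt_alt (energyImage : List (List Int)) (imageRGB : List (List (Int × Int × Int))) (seamCost : List (List Int)) : List (List Int) × (List (List (Int × Int × Int))) :=
  let h := energyImage.length
  let w : Int := ((PySem.List.pyGetD seamCost 0 []).length : Int)
  let lastRow := PySem.List.pyGetD seamCost ((h : Int) - 1) []
  let c0 := bScan lastRow 0 (lastRow.length : Int)
  let cols := bCols seamCost w h c0
  (List.zipWith (fun row c => bRemoveAt row c) energyImage cols,
   List.zipWith (fun row c => bRemoveAt row c) imageRGB cols)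

-- ===== PRECONDITION & SPEC =====
-- Pre_ = the natural seam-carving domain: the three lists are same-height rectangular images of width ≥ 2
-- (on width < 2 or on rows too short A raises IndexError; on other ragged/mismatched shapes A may happen to
-- return, popping whatever rows exist — an accident of its mutation loop that B, which rebuilds exactly
-- one output row per recorded seam column, does not reproduce; those shapes are excluded here).
def Pre_removeMinimalSeamAlt (energyImage : List (List Int)) (imageRGB : List (List (Int × Int × Int))) (seamCost : List (List Int)) : Prop :=
  energyImage ≠ [] ∧ seamCost.length = energyImage.length ∧ imageRGB.length = energyImage.length ∧
  2 ≤ (seamCost.headD []).length ∧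
  (∀ row ∈ seamCost, row.length = (seamCost.headD []).length) ∧
  (∀ row ∈ energyImage, row.length = (seamCost.headD []).length) ∧
  (∀ row ∈ imageRGB, row.length = (seamCost.headD []).length)
instance (energyImage : List (List Int)) (imageRGB : List (List (Int × Int × Int))) (seamCost : List (List Int)) : Decidable (Pre_removeMinimalSeamAlt energyImage imageRGB seamCost) := by unfold Pre_removeMinimalSeamAlt; infer_instance

def pvWitness_removeMinimalSeamAlt : List (List Int) × (List (List (Int × Int × Int))) × List (List Int) :=
  ([[1, 2]], [[(0, 0, 0), (1, 1, 1)]], [[3, 4]])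

def Spec_removeMinimalSeamAlt (energyImage : List (List Int)) (imageRGB : List (List (Int × Int × Int))) (seamCost : List (List Int)) (out : List (List Int) × (List (List (Int × Int × Int)))) : Prop := out = removeMinimalSeamAlt_alt energyImage imageRGB seamCost
instance (energyImage : List (List Int)) (imageRGB : List (List (Int × Int × Int))) (seamCost : List (List Int)) (out : List (List Int) × (List (List (Int × Int × Int)))) : Decidable (Spec_removeMinimalSeamAlt energyImage imageRGB seamCost out) := by unfold Spec_removeMinimalSeamAlt; infer_instance

-- ===== CLAIM (what is proved, stated in full; the proofs are below) =====
def Claim_equal_removeMinimalSeamAlt : Prop := ∀ (energyImage : List (List Int)) (imageRGB : List (List (Int × Int × Int))) (seamCost : List (List Int)), Dom_removeMinimalSeamAlt energyImage imageRGB seamCost → Pre_removeMinimalSeamAlt energyImage imageRGB seamCost → Spec_removeMinimalSeamAlt energyImage imageRGB seamCost (removeMinimalSeamAlt energyImage imageRGB seamCost)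

-- ===== LEMMAS AND PROOFS =====

lemma win_getD (row : List Int) (lo : Nat) (xs : List Int)
    (hwin : xs = (row.drop lo).take xs.length) (j : Nat) (hj : j < xs.length) :
    xs.getD j 0 = row.getD (lo + j) 0 := by
  have hlen : lo + j < row.length := by
    have := congrArg List.length hwin
    simp [List.length_take, List.length_drop] at this
    omega
  rw [List.getD_eq_getElem?_getD, List.getD_eq_getElem?_getD]
  conv_lhs => rw [hwin]
  rw [List.getElem?_take_of_lt hj, List.getElem?_drop]

lemma scan_eq (row : List Int) (lo : Nat) (a : Int) (t : List Int)
    (hwin : a :: t = (row.drop lo).take (t.length + 1)) :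
    ∃ k0 : Nat, k0 < t.length + 1 ∧
      PySem.List.index? (a :: t) (t.foldl min a) = some k0 ∧
      bScan row (lo : Int) (((lo + t.length + 1 : Nat)) : Int) = ((lo + k0 : Nat) : Int) := by
  induction t using List.reverseRecOn with
  | nil =>
    refine ⟨0, by omega, by simp, ?_⟩
    unfold bScan
    rw [show ((lo + [].length + 1 : Nat) : Int) = (lo : Int) + 1 by simp,
        PySem.List.pyRange_one_eq_nil (le_refl _)]
    simp
  | append_singleton t x ih =>
    have hlxs : (a :: (t ++ [x])).length = t.length + 2 := by simp
    have hwin' : a :: t = (row.drop lo).take (t.length + 1) := by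
      have h1 : (a :: (t ++ [x])).take (t.length + 1) = a :: t := by
        simp [List.take_append_of_le_length (by omega : t.length ≤ t.length)]
      rw [← h1, hwin, List.take_take]
      congr 1
      simp
    obtain ⟨k0, hk0, hidx, hscan⟩ := ih hwin'
    -- window values
    have hx : row.getD (lo + t.length + 1) 0 = x := by
      have h := win_getD row lo (a :: (t ++ [x])) (by rw [hlxs]; simpa using hwin) (t.length + 1) (by simp)
      rw [← Nat.add_assoc] at h
      rw [← h, List.getD_eq_getElem _ _ (by simp)]
      simp [List.getElem_cons_succ]
    have hmem0 := PySem.List.getElem_of_index?_eq_some hidx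
    obtain ⟨hklt, hkval, _⟩ := hmem0
    have hbestval : row.getD (lo + k0) 0 = t.foldl min a := by
      have := win_getD row lo (a :: t) (by simpa using hwin') k0 (by simpa using hk0)
      rw [List.getD_eq_getElem _ _ (by simpa using hk0)] at this
      rw [← this, hkval]
    have hminfold : (t ++ [x]).foldl min a = min (t.foldl min a) x := by
      rw [List.foldl_append]; rfl
    have hmem : t.foldl min a ∈ a :: t := by
      have : (PySem.List.index? (a :: t) (t.foldl min a)).isSome := by rw [hidx]; rfl
      exact (PySem.List.index?_isSome_iff _ _).1 this
    have hle : ∀ y ∈ a :: t, t.foldl min a ≤ y := by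
      intro y hy
      rcases List.mem_cons.1 hy with rfl | hy
      · exact (PySem.List.foldl_min_le t y).1
      · exact (PySem.List.foldl_min_le t a).2 y hy
    -- unfold one step of the scan
    have hsplit : PySem.List.pyRange ((lo : Int) + 1) ((lo + (t ++ [x]).length + 1 : Nat) : Int) 1
        = PySem.List.pyRange ((lo : Int) + 1) ((lo + t.length + 1 : Nat) : Int) 1 ++ [((lo + t.length + 1 : Nat) : Int)] := by
      rw [show ((lo + (t ++ [x]).length + 1 : Nat) : Int) = ((lo + t.length + 1 : Nat) : Int) + 1 by simp [List.length_append]; omega]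
      exact PySem.List.pyRange_one_succ_right (by push_cast; omega)
    have hstep : bScan row (lo : Int) ((lo + (t ++ [x]).length + 1 : Nat) : Int)
        = if PySem.List.pyGetD row ((lo + t.length + 1 : Nat) : Int) 0 < PySem.List.pyGetD row ((lo + k0 : Nat) : Int) 0
          then ((lo + t.length + 1 : Nat) : Int) else ((lo + k0 : Nat) : Int) := by
      unfold bScan
      rw [hsplit, List.foldl_append]
      rw [show ((PySem.List.pyRange ((lo:Int)+1) ((lo + t.length + 1 : Nat):Int) 1).foldl
            (fun best j => if PySem.List.pyGetD row j 0 < PySem.List.pyGetD row best 0 then j else best) (lo:Int))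
          = bScan row (lo:Int) ((lo + t.length + 1 : Nat):Int) from rfl, hscan]
      simp
    by_cases hcase : t.foldl min a ≤ x
    · refine ⟨k0, by simp; omega, ?_, ?_⟩
      · rw [hminfold, min_eq_left hcase, show a :: (t ++ [x]) = (a :: t) ++ [x] by simp,
            PySem.List.index?_append_of_mem _ hmem, hidx]
      · rw [hstep, if_neg (by simp only [PySem.List.pyGetD_natCast]; rw [hx, hbestval]; omega)]
    · refine ⟨t.length + 1, by simp, ?_, ?_⟩
      · have hnot : x ∉ a :: t := by
          intro hmemx
          exact hcase (hle x hmemx)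
        have hfind : PySem.List.index? ((a :: t) ++ [x]) x = some (t.length + 1) := by
          simpa using PySem.List.index?_append_singleton_self (a :: t) x hnot
        rw [hminfold, min_eq_right (le_of_lt (lt_of_not_ge hcase)), ← List.cons_append]
        exact hfind
      · rw [hstep, if_pos (by simp only [PySem.List.pyGetD_natCast]; rw [hx, hbestval]; omega)]
        congr 1

lemma window2 (row : List Int) (lo : Nat) (h : lo + 2 ≤ row.length) :
    [row.getD lo 0, row.getD (lo + 1) 0] = (row.drop lo).take 2 := by
  have h1 : row.drop lo = row[lo]'(by omega) :: row[lo + 1]'(by omega) :: row.drop (lo + 2) := by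
    rw [List.drop_eq_getElem_cons (show lo < row.length by omega),
        List.drop_eq_getElem_cons (show lo + 1 < row.length by omega)]
  rw [h1]
  simp only [List.take_succ_cons, List.take_zero]
  rw [List.getD_eq_getElem row 0 (show lo < row.length by omega),
      List.getD_eq_getElem row 0 (show lo + 1 < row.length by omega)]

lemma window3 (row : List Int) (lo : Nat) (h : lo + 3 ≤ row.length) :
    [row.getD lo 0, row.getD (lo + 1) 0, row.getD (lo + 2) 0] = (row.drop lo).take 3 := by
  have h1 : row.drop lo = row[lo]'(by omega) :: row[lo + 1]'(by omega) :: row[lo + 2]'(by omega) :: row.drop (lo + 3) := by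
    rw [List.drop_eq_getElem_cons (show lo < row.length by omega),
        List.drop_eq_getElem_cons (show lo + 1 < row.length by omega),
        List.drop_eq_getElem_cons (show lo + 2 < row.length by omega)]
  rw [h1]
  simp only [List.take_succ_cons, List.take_zero]
  rw [List.getD_eq_getElem row 0 (show lo < row.length by omega),
      List.getD_eq_getElem row 0 (show lo + 1 < row.length by omega),
      List.getD_eq_getElem row 0 (show lo + 2 < row.length by omega)]

lemma stepA (row : List Int) (w : Nat) (hrow : row.length = w) (hw : 2 ≤ w) (n : Nat) (hn : n < w) :
    ∃ n' : Nat, n' < w ∧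
      (if (n : Int) = 0 then
        pyIndexFrom row (min (PySem.List.pyGetD row (n : Int) 0) (PySem.List.pyGetD row ((n : Int) + 1) 0)) (n : Int) ((n : Int) + 2)
      else if (n : Int) = (w : Int) - 1 then
        pyIndexFrom row (min (PySem.List.pyGetD row ((n : Int) - 1) 0) (PySem.List.pyGetD row (n : Int) 0)) ((n : Int) - 1) ((n : Int) + 1)
      else
        pyIndexFrom row (min (min (PySem.List.pyGetD row ((n : Int) - 1) 0) (PySem.List.pyGetD row (n : Int) 0)) (PySem.List.pyGetD row ((n : Int) + 1) 0)) ((n : Int) - 1) ((n : Int) + 2)) = ((n' : Nat) : Int) ∧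
      bScan row (max 0 ((n : Int) - 1)) (min (w : Int) ((n : Int) + 2)) = ((n' : Nat) : Int) := by
  by_cases h0 : n = 0
  · subst h0
    obtain ⟨k0, hk0, hidx, hscan⟩ := scan_eq row 0 (row.getD 0 0) [row.getD 1 0]
      (by simpa using window2 row 0 (by omega))
    refine ⟨k0, by simp only [List.length_cons, List.length_nil] at hk0; omega, ?_, ?_⟩
    · rw [if_pos (by norm_num)]
      unfold pyIndexFrom
      rw [show (((0 : Nat) : Int) + 2) = ((2 : Nat) : Int) by norm_num, PySem.List.slice_natCast,
          show (2 - 0 : Nat) = 2 from rfl, ← window2 row 0 (by omega),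
          show (((0 : Nat) : Int) + 1) = ((1 : Nat) : Int) by norm_num]
      simp only [PySem.List.pyGetD_natCast]
      rw [show min (row.getD 0 0) (row.getD 1 0) = [row.getD 1 0].foldl min (row.getD 0 0) from rfl, hidx]
      simp
    · simp at hscan
      rw [show max 0 (((0 : Nat) : Int) - 1) = 0 by norm_num,
          show min ((w : Int)) (((0 : Nat) : Int) + 2) = 2 by omega]
      simpa using hscan
  · by_cases h1 : n = w - 1
    · have hn1 : 1 ≤ n := by omega
      obtain ⟨k0, hk0, hidx, hscan⟩ := scan_eq row (n - 1) (row.getD (n - 1) 0) [row.getD n 0]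
        (by
          have hwerte := window2 row (n - 1) (by omega)
          rw [show n - 1 + 1 = n by omega] at hwerte
          simpa using hwerte)
      refine ⟨n - 1 + k0, by simp at hk0; omega, ?_, ?_⟩
      · rw [if_neg (by omega), if_pos (by omega)]
        unfold pyIndexFrom
        rw [show ((n : Int) - 1) = (((n - 1 : Nat)) : Int) by omega,
            show ((n : Int) + 1) = (((n + 1 : Nat)) : Int) by push_cast; ring,
            PySem.List.slice_natCast,
            show (n + 1) - (n - 1) = 2 by omega,
            ← window2 row (n - 1) (by omega),
            show n - 1 + 1 = n by omega]
        simp only [PySem.List.pyGetD_natCast]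
        rw [show min (row.getD (n - 1) 0) (row.getD n 0) = [row.getD n 0].foldl min (row.getD (n - 1) 0) from rfl, hidx]
        simp
      · simp only [List.length_cons, List.length_nil] at hscan
        rw [show max 0 ((n : Int) - 1) = ((n - 1 : Nat) : Int) by omega,
            show min ((w : Int)) ((n : Int) + 2) = ((n - 1 + 0 + 1 + 1 : Nat) : Int) by omega]
        exact hscan
    · have hn1 : 1 ≤ n := by omega
      have hn2 : n + 2 ≤ w := by omega
      obtain ⟨k0, hk0, hidx, hscan⟩ := scan_eq row (n - 1) (row.getD (n - 1) 0) [row.getD n 0, row.getD (n + 1) 0]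
        (by
          have hwerte := window3 row (n - 1) (by omega)
          rw [show n - 1 + 1 = n by omega, show n - 1 + 2 = n + 1 by omega] at hwerte
          simpa using hwerte)
      refine ⟨n - 1 + k0, by simp at hk0; omega, ?_, ?_⟩
      · rw [if_neg (by omega), if_neg (by omega)]
        unfold pyIndexFrom
        rw [show ((n : Int) - 1) = (((n - 1 : Nat)) : Int) by omega,
            show ((n : Int) + 2) = (((n + 2 : Nat)) : Int) by push_cast; ring,
            PySem.List.slice_natCast,
            show (n + 2) - (n - 1) = 3 by omega,
            ← window3 row (n - 1) (by omega),
            show n - 1 + 1 = n by omega, show n - 1 + 2 = n + 1 by omega]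
        simp only [PySem.List.pyGetD_natCast]
        rw [show ((n : Int) + 1) = (((n + 1 : Nat)) : Int) by push_cast; ring]
        simp only [PySem.List.pyGetD_natCast]
        rw [show min (min (row.getD (n - 1) 0) (row.getD n 0)) (row.getD (n + 1) 0)
              = [row.getD n 0, row.getD (n + 1) 0].foldl min (row.getD (n - 1) 0) from rfl, hidx]
        simp
      · simp only [List.length_cons, List.length_nil] at hscan
        rw [show max 0 ((n : Int) - 1) = ((n - 1 : Nat) : Int) by omega,
            show min ((w : Int)) ((n : Int) + 2) = ((n - 1 + (0 + 1 + 1) + 1 : Nat) : Int) by omega]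
        exact hscan

lemma bCols_length (S : List (List Int)) (w : Int) (k : Nat) (c : Int) :
    (bCols S w k c).length = k := by
  induction k generalizing c with
  | zero => simp [bCols]
  | succ k ih => simp [bCols, ih]

lemma bRemoveAt_natCast {α : Type} (row : List α) (n : Nat) :
    bRemoveAt row ((n : Nat) : Int) = row.eraseIdx n := by
  unfold bRemoveAt
  rw [PySem.List.slice_to_natCast, show ((n : Int) + 1) = (((n + 1 : Nat)) : Int) by push_cast; ring,
      PySem.List.slice_from_natCast, List.eraseIdx_eq_take_drop_succ]

lemma take_set_self {α : Type} (l : List α) (n : Nat) (v : α) : (l.set n v).take n = l.take n := by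
  apply List.ext_getElem
  · simp [List.length_take]
  · intro i h1 h2
    simp only [List.getElem_take, List.getElem_set]
    rw [if_neg (by simp [List.length_take] at h1; omega)]

lemma drop_set_cons {α : Type} (l : List α) (n : Nat) (v : α) (h : n < l.length) :
    (l.set n v).drop n = v :: l.drop (n + 1) := by
  rw [List.drop_eq_getElem_cons (l := l.set n v) (by simpa using h)]
  simp [List.drop_set]

lemma assemble {α : Type} (X : List (List α)) (cols : List Int) (k n : Nat)
    (hkX : k + 1 ≤ X.length) (hcols : cols.length = k) :
    List.zipWith (fun row c => bRemoveAt row c) ((X.set k ((X[k]'(by omega)).eraseIdx n)).take k) cols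
      ++ (X.set k ((X[k]'(by omega)).eraseIdx n)).drop k
    = List.zipWith (fun row c => bRemoveAt row c) (X.take (k + 1)) (cols ++ [(n : Int)]) ++ X.drop (k + 1) := by
  rw [take_set_self, drop_set_cons _ _ _ (by omega),
      List.take_succ_eq_append_getElem (by omega),
      List.zipWith_append (by simp [List.length_take]; omega)]
  simp [bRemoveAt_natCast]

lemma aLoop_eq (S : List (List Int)) (w : Nat) (hw : 2 ≤ w)
    (hS : ∀ row ∈ S, row.length = w) (hSne : S ≠ []) :
    ∀ (k : Nat) (E : List (List Int)) (R : List (List (Int × Int × Int))) (n : Nat) (p : Int),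
      k ≤ E.length → k ≤ R.length → k ≤ S.length → n < w →
      (∀ j (hj : j < E.length), j < k → E[j].length = w) →
      (∀ j (hj : j < R.length), j < k → R[j].length = w) →
      aLoop S (w : Int) k E R (n : Int) p =
        (List.zipWith (fun row c => bRemoveAt row c) (E.take k) (bCols S (w : Int) k (n : Int)) ++ E.drop k,
         List.zipWith (fun row c => bRemoveAt row c) (R.take k) (bCols S (w : Int) k (n : Int)) ++ R.drop k) := by
  intro k
  induction k with
  | zero => intro E R n p _ _ _ _ _ _; simp [aLoop, bCols]
  | succ k ih =>
    intro E R n p hkE hkR hkS hn hE hR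
    have hrowmem : PySem.List.pyGetD S ((k : Int) - 1) [] ∈ S := by
      rcases Nat.eq_zero_or_pos k with hk | hk
      · subst hk
        rw [show ((0 : Nat) : Int) - 1 = (-1 : Int) by norm_num, PySem.List.pyGetD_neg_one S [] hSne]
        exact List.getLast_mem hSne
      · rw [show ((k : Int) - 1) = ((k - 1 : Nat) : Int) by omega, PySem.List.pyGetD_natCast,
            List.getD_eq_getElem S [] (show k - 1 < S.length by omega)]
        exact List.getElem_mem _
    have hrowlen : (PySem.List.pyGetD S ((k : Int) - 1) []).length = w := hS _ hrowmem
    obtain ⟨n', hn', hA, hB⟩ := stepA (PySem.List.pyGetD S ((k : Int) - 1) []) w hrowlen hw n hn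
    have hEk : (E[k]'(by omega)).length = w := hE k (by omega) (by omega)
    have hRk : (R[k]'(by omega)).length = w := hR k (by omega) (by omega)
    have hpopE : ((PySem.List.pop? (PySem.List.pyGetD E (k : Int) []) (n : Int)).map Prod.snd).getD []
        = (E[k]'(by omega)).eraseIdx n := by
      rw [PySem.List.pyGetD_natCast, List.getD_eq_getElem E [] (by omega),
          PySem.List.pop?_natCast _ n (by omega)]
      rfl
    have hpopR : ((PySem.List.pop? (PySem.List.pyGetD R (k : Int) []) (n : Int)).map Prod.snd).getD []
        = (R[k]'(by omega)).eraseIdx n := by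
      rw [PySem.List.pyGetD_natCast, List.getD_eq_getElem R [] (by omega),
          PySem.List.pop?_natCast _ n (by omega)]
      rfl
    have hihE : ∀ j (hj : j < (E.set k ((E[k]'(by omega)).eraseIdx n)).length), j < k →
        ((E.set k ((E[k]'(by omega)).eraseIdx n))[j]'hj).length = w := by
      intro j hj hjk
      rw [List.getElem_set_ne (by omega)]
      exact hE j (by simpa using hj) (by omega)
    have hihR : ∀ j (hj : j < (R.set k ((R[k]'(by omega)).eraseIdx n)).length), j < k →
        ((R.set k ((R[k]'(by omega)).eraseIdx n))[j]'hj).length = w := by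
      intro j hj hjk
      rw [List.getElem_set_ne (by omega)]
      exact hR j (by simpa using hj) (by omega)
    have hrec := ih (E.set k ((E[k]'(by omega)).eraseIdx n)) (R.set k ((R[k]'(by omega)).eraseIdx n))
      n' ((n : Nat) : Int) (by simp; omega) (by simp; omega) (by omega) hn' hihE hihR
    have hcols : bCols S (w : Int) (k + 1) (n : Int)
        = bCols S (w : Int) k ((n' : Nat) : Int) ++ [((n : Nat) : Int)] := by
      simp only [bCols]
      rw [hB]
    simp only [aLoop]
    split_ifs with h0 h1
    · rw [if_pos h0] at hA
      rw [hpopE, hpopR, hA, hrec, hcols,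
          assemble E _ k n (by omega) (bCols_length _ _ _ _),
          assemble R _ k n (by omega) (bCols_length _ _ _ _)]
    · rw [if_neg h0, if_pos h1] at hA
      rw [hpopE, hpopR, hA, hrec, hcols,
          assemble E _ k n (by omega) (bCols_length _ _ _ _),
          assemble R _ k n (by omega) (bCols_length _ _ _ _)]
    · rw [if_neg h0, if_neg h1] at hA
      rw [hpopE, hpopR, hA, hrec, hcols,
          assemble E _ k n (by omega) (bCols_length _ _ _ _),
          assemble R _ k n (by omega) (bCols_length _ _ _ _)]

lemma ports_agree (E : List (List Int)) (R : List (List (Int × Int × Int))) (S : List (List Int))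
    (hne : E ≠ []) (hSlen : S.length = E.length) (hRlen : R.length = E.length)
    (hw : 2 ≤ (S.headD []).length)
    (hSrows : ∀ row ∈ S, row.length = (S.headD []).length)
    (hErows : ∀ row ∈ E, row.length = (S.headD []).length)
    (hRrows : ∀ row ∈ R, row.length = (S.headD []).length) :
    removeMinimalSeamAlt E R S = removeMinimalSeamAlt_alt E R S := by
  have hEpos : 0 < E.length := List.length_pos_iff.2 hne
  have hSne : S ≠ [] := by
    intro h; rw [h] at hSlen; simp at hSlen; omega
  have hw0 : ((PySem.List.pyGetD S 0 []).length : Int) = (((S.headD []).length : Nat) : Int) := by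
    cases S with
    | nil => exact absurd rfl hSne
    | cons s0 t => simp [PySem.List.pyGetD_zero_cons]
  have hlastN : ((E.length : Int) - 1) = ((E.length - 1 : Nat) : Int) := by omega
  have hlastEq : PySem.List.pyGetD S ((E.length : Int) - 1) [] = S[E.length - 1]'(by omega) := by
    rw [hlastN, PySem.List.pyGetD_natCast, List.getD_eq_getElem S [] (by omega)]
  have hlastMem : PySem.List.pyGetD S ((E.length : Int) - 1) [] ∈ S := by
    rw [hlastEq]; exact List.getElem_mem _
  have hlastLen : (PySem.List.pyGetD S ((E.length : Int) - 1) []).length = (S.headD []).length :=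
    hSrows _ hlastMem
  obtain ⟨a, t, hat⟩ : ∃ a t, PySem.List.pyGetD S ((E.length : Int) - 1) [] = a :: t := by
    cases h : PySem.List.pyGetD S ((E.length : Int) - 1) [] with
    | nil => rw [h] at hlastLen; simp only [List.length_nil] at hlastLen; omega
    | cons a t => exact ⟨a, t, rfl⟩
  have htlen : t.length + 1 = (S.headD []).length := by
    rw [← hlastLen, hat]; simp
  obtain ⟨k0, hk0, hidx, hscan⟩ := scan_eq (PySem.List.pyGetD S ((E.length : Int) - 1) []) 0 a t
    (by rw [List.drop_zero, hat, show t.length + 1 = (a :: t).length by simp, List.take_length])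
  have hk0w : k0 < (S.headD []).length := by omega
  -- A's starting index is ↑k0
  have hmin : (PySem.List.min? (PySem.List.pyGetD S ((E.length : Int) - 1) []) (fun x => x)).getD 0
      = t.foldl min a := by
    rw [hat, PySem.List.min?_id_cons]; rfl
  have hstart : ((PySem.List.index? (PySem.List.pyGetD S ((E.length : Int) - 1) [])
      ((PySem.List.min? (PySem.List.pyGetD S ((E.length : Int) - 1) []) (fun x => x)).getD 0)).map
        (fun j => (j : Int))).getD 0 = ((k0 : Nat) : Int) := by
    rw [hmin]
    conv_lhs => rw [hat]
    rw [hidx]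
    rfl
  -- B's starting index is ↑k0 too
  have hstartB : bScan (PySem.List.pyGetD S ((E.length : Int) - 1) []) 0
      (((PySem.List.pyGetD S ((E.length : Int) - 1) []).length : Nat) : Int) = ((k0 : Nat) : Int) := by
    have h1 : (((PySem.List.pyGetD S ((E.length : Int) - 1) []).length : Nat) : Int)
        = ((0 + t.length + 1 : Nat) : Int) := by
      rw [hat]; simp
    rw [h1, show (0 : Int) = ((0 : Nat) : Int) by norm_num, hscan]
    simp
  have hmain := aLoop_eq S (S.headD []).length hw hSrows hSne E.length E R k0 ((k0 : Nat) : Int)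
    (le_refl _) (by omega) (by omega) hk0w
    (fun j hj _ => hErows _ (List.getElem_mem _))
    (fun j hj _ => hRrows _ (List.getElem_mem _))
  simp only [removeMinimalSeamAlt, removeMinimalSeamAlt_alt]
  rw [hstart, hw0, hmain, hstartB]
  rw [List.take_length, List.drop_length, List.append_nil,
      show R.take E.length = R by rw [← hRlen, List.take_length],
      show R.drop E.length = R.drop R.length by rw [hRlen], List.drop_length, List.append_nil]

-- ===== VERDICT (by name: the statement is the Claim_ definition above) =====
theorem removeMinimalSeamAlt_spec : Claim_equal_removeMinimalSeamAlt := by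
  intro energyImage imageRGB seamCost _hdom hpre
  unfold Spec_removeMinimalSeamAlt
  obtain ⟨hne, hSlen, hRlen, hw, hSrows, hErows, hRrows⟩ := hpre
  exact ports_agree energyImage imageRGB seamCost hne hSlen hRlen hw hSrows hErows hRrows
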